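-- pv_equiv track=rewrite | github.com/markppppy/python3 | scripts/20210111.py | get_appoint_num
-- ===== SOURCE A (Python) =====
-- def get_appoint_num(start_num: int, end_num: int):
--     nums = []
--     for num in range(start_num, end_num):
--         low = num % 10
--         middle = num // 10 % 10
--         high = num // 100 % 10
--         if num == low ** 3 + middle** 3 + high ** 3:
--             nums.append(num)
--     return nums
-- ===== SOURCE B (Python) =====
-- # Any match must satisfy num == cube-sum of its last three digits, and that
-- # sum lies in [0, 2187]; so the solutions are a fixed finite set, precomputed
-- # once, and the function is just a range filter over six constants.
-- _VALID = [0, 1, 153, 370, 371, 407]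
--
-- def get_appoint_num(start_num: int, end_num: int):
--     return [n for n in _VALID if start_num <= n < end_num]
-- ===== Notes on version B (the rewrite author's own statement) =====
-- stated objective: faster
-- what changed: B replaces A's linear scan of the whole range with a filter over the precomputed fixed set of the six numbers (0,1,153,370,371,407) that can ever satisfy the cube-sum property, proved exhaustive since any solution is bounded by 3*9^3.
import Mathlib
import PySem

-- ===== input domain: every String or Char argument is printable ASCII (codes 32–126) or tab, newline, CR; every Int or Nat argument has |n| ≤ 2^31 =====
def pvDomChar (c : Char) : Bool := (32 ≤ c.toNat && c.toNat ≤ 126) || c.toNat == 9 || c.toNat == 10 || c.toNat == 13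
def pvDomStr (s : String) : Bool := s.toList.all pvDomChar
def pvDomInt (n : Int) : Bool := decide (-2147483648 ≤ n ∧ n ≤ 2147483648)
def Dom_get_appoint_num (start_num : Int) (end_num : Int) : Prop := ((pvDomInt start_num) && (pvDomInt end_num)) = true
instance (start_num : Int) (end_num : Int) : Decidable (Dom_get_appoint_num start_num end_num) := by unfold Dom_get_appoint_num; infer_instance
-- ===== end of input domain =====

set_option maxRecDepth 100000
set_option maxHeartbeats 1000000


-- B replaces A's linear scan of the range by filtering the precomputed finite set of
-- all six solutions (any solution equals a sum of three digit cubes, hence lies in [0, 2187]).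

-- ===== PORT A =====
def get_appoint_num (start_num : Int) (end_num : Int) : List Int :=
  (PySem.List.pyRange start_num end_num 1).foldl
    (fun nums num =>
      let low := PySem.Int.mod num 10
      let middle := PySem.Int.mod (PySem.Int.floordiv num 10) 10
      let high := PySem.Int.mod (PySem.Int.floordiv num 100) 10
      if num = low ^ 3 + middle ^ 3 + high ^ 3 then nums ++ [num] else nums)
    []

-- ===== PORT B =====
def pvValidNums : List Int := [0, 1, 153, 370, 371, 407]

def get_appoint_num_alt (start_num : Int) (end_num : Int) : List Int :=
  pvValidNums.filter (fun n => decide (start_num ≤ n) && decide (n < end_num))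

-- ===== PRECONDITION & SPEC =====
def Spec_get_appoint_num (start_num : Int) (end_num : Int) (out : List Int) : Prop := out = get_appoint_num_alt start_num end_num
instance (start_num : Int) (end_num : Int) (out : List Int) : Decidable (Spec_get_appoint_num start_num end_num out) := by unfold Spec_get_appoint_num; infer_instance

-- ===== CLAIM (what is proved, stated in full; the proofs are below) =====
def Claim_equal_get_appoint_num : Prop := ∀ (start_num : Int) (end_num : Int), Dom_get_appoint_num start_num end_num → Spec_get_appoint_num start_num end_num (get_appoint_num start_num end_num)

-- ===== LEMMAS AND PROOFS =====

-- A's loop condition, as a reusable Boolean predicate over the input number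
def pvCondB (n : Int) : Bool :=
  decide (n = (PySem.Int.mod n 10) ^ 3 + (PySem.Int.mod (PySem.Int.floordiv n 10) 10) ^ 3 +
      (PySem.Int.mod (PySem.Int.floordiv n 100) 10) ^ 3)

-- A's foldl is a filter over the range
lemma foldA_eq_filter (l : List Int) (acc : List Int) :
    l.foldl
      (fun nums num =>
        let low := PySem.Int.mod num 10
        let middle := PySem.Int.mod (PySem.Int.floordiv num 10) 10
        let high := PySem.Int.mod (PySem.Int.floordiv num 100) 10
        if num = low ^ 3 + middle ^ 3 + high ^ 3 then nums ++ [num] else nums)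
      acc
    = acc ++ l.filter pvCondB := by
  induction l generalizing acc with
  | nil => simp
  | cons x xs ih =>
    have hstep : ∀ (a : List Int),
        (let low := PySem.Int.mod x 10
         let middle := PySem.Int.mod (PySem.Int.floordiv x 10) 10
         let high := PySem.Int.mod (PySem.Int.floordiv x 100) 10
         if x = low ^ 3 + middle ^ 3 + high ^ 3 then a ++ [x] else a)
        = if h : x = (PySem.Int.mod x 10) ^ 3 + (PySem.Int.mod (PySem.Int.floordiv x 10) 10) ^ 3 +
              (PySem.Int.mod (PySem.Int.floordiv x 100) 10) ^ 3 then a ++ [x] else a := by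
      intro a
      by_cases h : x = (PySem.Int.mod x 10) ^ 3 + (PySem.Int.mod (PySem.Int.floordiv x 10) 10) ^ 3 +
          (PySem.Int.mod (PySem.Int.floordiv x 100) 10) ^ 3
      · rw [dif_pos h]; exact if_pos h
      · rw [dif_neg h]; exact if_neg h
    rw [List.foldl_cons, hstep, List.filter_cons]
    by_cases h : x = (PySem.Int.mod x 10) ^ 3 + (PySem.Int.mod (PySem.Int.floordiv x 10) 10) ^ 3 +
        (PySem.Int.mod (PySem.Int.floordiv x 100) 10) ^ 3
    · have hbt : pvCondB x = true := by unfold pvCondB; exact decide_eq_true h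
      rw [dif_pos h, ih, if_pos hbt, List.append_assoc]; rfl
    · have hbf : pvCondB x = false := by unfold pvCondB; exact decide_eq_false h
      rw [dif_neg h, ih, if_neg (by simp [hbf])]

-- the loop condition characterised: exactly the six precomputed numbers satisfy it
lemma cond_iff (n : Int) : pvCondB n = true ↔ n ∈ pvValidNums := by
  by_cases hlo : 0 ≤ n
  · by_cases hhi : n < 2188
    · have key : ∀ m : Nat, m < 2188 → (pvCondB (m : Int) = true ↔ (m : Int) ∈ pvValidNums) := by
        decide
      have hn : n = ((n.toNat : Nat) : Int) := by omega
      rw [hn]; exact key n.toNat (by omega)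
    · rw [show pvCondB n = true ↔
          n = (PySem.Int.mod n 10) ^ 3 + (PySem.Int.mod (PySem.Int.floordiv n 10) 10) ^ 3 +
            (PySem.Int.mod (PySem.Int.floordiv n 100) 10) ^ 3 from by
        unfold pvCondB; exact decide_eq_true_iff]
      have h10 : (0:Int) < 10 := by norm_num
      have ha0 := PySem.Int.mod_nonneg n h10
      have ha9 := PySem.Int.mod_lt n h10
      have hb0 := PySem.Int.mod_nonneg (PySem.Int.floordiv n 10) h10
      have hb9 := PySem.Int.mod_lt (PySem.Int.floordiv n 10) h10
      have hc0 := PySem.Int.mod_nonneg (PySem.Int.floordiv n 100) h10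
      have hc9 := PySem.Int.mod_lt (PySem.Int.floordiv n 100) h10
      have hsum9 : (PySem.Int.mod n 10) ^ 3 + (PySem.Int.mod (PySem.Int.floordiv n 10) 10) ^ 3 +
          (PySem.Int.mod (PySem.Int.floordiv n 100) 10) ^ 3 ≤ 2187 := by
        nlinarith [sq_nonneg (PySem.Int.mod n 10), sq_nonneg (PySem.Int.mod (PySem.Int.floordiv n 10) 10),
          sq_nonneg (PySem.Int.mod (PySem.Int.floordiv n 100) 10)]
      constructor
      · intro h; exfalso; linarith
      · intro h; exfalso; simp [pvValidNums] at h; omega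
  · rw [show pvCondB n = true ↔
        n = (PySem.Int.mod n 10) ^ 3 + (PySem.Int.mod (PySem.Int.floordiv n 10) 10) ^ 3 +
          (PySem.Int.mod (PySem.Int.floordiv n 100) 10) ^ 3 from by
      unfold pvCondB; exact decide_eq_true_iff]
    have h10 : (0:Int) < 10 := by norm_num
    have ha0 := PySem.Int.mod_nonneg n h10
    have hb0 := PySem.Int.mod_nonneg (PySem.Int.floordiv n 10) h10
    have hc0 := PySem.Int.mod_nonneg (PySem.Int.floordiv n 100) h10
    have hsum0 : 0 ≤ (PySem.Int.mod n 10) ^ 3 + (PySem.Int.mod (PySem.Int.floordiv n 10) 10) ^ 3 +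
        (PySem.Int.mod (PySem.Int.floordiv n 100) 10) ^ 3 := by positivity
    constructor
    · intro h; exfalso; linarith
    · intro h; exfalso; simp [pvValidNums] at h; omega

lemma A_eq_range_filter (s e : Int) :
    get_appoint_num s e
      = (PySem.List.pyRange s e 1).filter (fun n => decide (n ∈ pvValidNums)) := by
  unfold get_appoint_num
  rw [foldA_eq_filter]
  simp only [List.nil_append]
  refine List.filter_congr (fun x _ => ?_)
  by_cases hm : x ∈ pvValidNums
  · simp [(cond_iff x).mpr hm, hm]
  · have hcf : pvCondB x = false := by
      cases hcv : pvCondB x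
      · rfl
      · exact absurd ((cond_iff x).mp hcv) hm
    simp [hcf, hm]

theorem get_appoint_num_spec : Claim_equal_get_appoint_num := by
  intro s e _
  unfold Spec_get_appoint_num get_appoint_num_alt
  rw [A_eq_range_filter]
  have hpr : ((PySem.List.pyRange s e 1).filter (fun n => decide (n ∈ pvValidNums))).Pairwise (· < ·) :=
    (PySem.List.pairwise_lt_pyRange_one s e).filter _
  have hpv : (pvValidNums.filter (fun n => decide (s ≤ n) && decide (n < e))).Pairwise (· < ·) := by
    have : pvValidNums.Pairwise (· < ·) := by decide
    exact this.filter _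
  have hperm : ((PySem.List.pyRange s e 1).filter (fun n => decide (n ∈ pvValidNums))).Perm
      (pvValidNums.filter (fun n => decide (s ≤ n) && decide (n < e))) := by
    rw [List.perm_ext_iff_of_nodup (hpr.imp ne_of_lt) (hpv.imp ne_of_lt)]
    intro x
    simp only [List.mem_filter, PySem.List.mem_pyRange_one, decide_eq_true_eq, Bool.and_eq_true]
    tauto
  exact List.Perm.eq_of_pairwise' (hpr.imp le_of_lt) (hpv.imp le_of_lt) hperm
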